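-- pv_equiv track=rewrite | github.com/MrBrantCode/unitest_baseline | mut_generate/mist_train_cf/cf_56885/solution.py | count_syllable_len
-- ===== SOURCE A (Python) =====
-- def count_syllable_len(word):
--     vowels = 'aeiou'
--     word = word.lower().strip(".:;?!")
--     count = 0
--     word_syllable_lengths = []
--
--     # Count syllable lengths
--     for letter in word:
--         if letter in vowels:
--             count +=1
--         else:
--             if count > 0:
--                 word_syllable_lengths.append(count)
--                 count = 0
--
--     # Add last syllable length
--     if count > 0:
--         word_syllable_lengths.append(count)
--
--     # If word has second syllable return its length else return 0
--     if len(word_syllable_lengths) >= 2: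
--         return word_syllable_lengths[1]
--     else:
--         return 0
-- ===== SOURCE B (Python) =====
-- def count_syllable_len(word):
--     w = word.lower().strip(".:;?!")
--     vowels = 'aeiou'
--     n = len(w)
--     i = 0
--     while i < n and w[i] not in vowels:   # skip leading non-vowels
--         i += 1
--     while i < n and w[i] in vowels:       # skip the first vowel run
--         i += 1
--     while i < n and w[i] not in vowels:   # skip the gap
--         i += 1
--     j = i
--     while j < n and w[j] in vowels:       # measure the second vowel run
--         j += 1
--     return j - i
-- ===== Notes on version B (the rewrite author's own statement) =====
-- stated objective: alternative
-- what changed: Replaces A's counter/flush accumulator loop that builds the list of ALL vowel-run lengths by four staged index-skipping loops that locate only the second vowel run and return j - i, building no list and ignoring everything after that run.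
import Mathlib
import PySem

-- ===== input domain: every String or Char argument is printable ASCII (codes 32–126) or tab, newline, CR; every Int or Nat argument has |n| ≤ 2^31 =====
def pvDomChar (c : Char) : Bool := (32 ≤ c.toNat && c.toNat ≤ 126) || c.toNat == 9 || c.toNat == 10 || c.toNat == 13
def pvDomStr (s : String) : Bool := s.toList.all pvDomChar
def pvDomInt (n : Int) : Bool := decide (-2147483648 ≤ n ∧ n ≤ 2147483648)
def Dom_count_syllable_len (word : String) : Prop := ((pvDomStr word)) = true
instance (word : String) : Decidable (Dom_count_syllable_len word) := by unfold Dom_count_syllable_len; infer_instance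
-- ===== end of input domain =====

-- B replaces A's counter/flush accumulator loop (which collects ALL vowel-run lengths in a list)
-- by four staged index-skipping loops that locate only the second vowel run and return j - i;
-- objective: alternative (same O(n) cost, no list built).


-- ===== PORT A =====
def count_syllable_len (word : String) : Int :=
  let vowels : List Char := "aeiou".toList
  let w := PySem.Str.stripChars (PySem.Str.lower word) ".:;?!"
  -- for letter in word: if letter in vowels: count += 1 else: if count > 0: append; count = 0
  let st := w.toList.foldl
    (fun (st : Int × List Int) letter =>
      if vowels.contains letter then (st.1 + 1, st.2)
      else if st.1 > 0 then (0, st.2 ++ [st.1]) else st)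
    (0, [])
  let lens := if st.1 > 0 then st.2 ++ [st.1] else st.2
  if lens.length ≥ 2 then lens.getD 1 0 else 0

-- ===== PORT B =====
def pvIsVowel (c : Char) : Bool := "aeiou".toList.contains c

-- 'while i < n and p(w[i]): i += 1' of Source B, transliterated as index recursion (exact)
def pvSkip (p : Char → Bool) (w : List Char) (i : Nat) : Nat :=
  if h : i < w.length ∧ p (w.getD i ' ') then pvSkip p w (i + 1) else i
termination_by w.length - i

def count_syllable_len_alt (word : String) : Int :=
  let w := (PySem.Str.stripChars (PySem.Str.lower word) ".:;?!").toList
  let i1 := pvSkip (fun c => !pvIsVowel c) w 0    -- skip leading non-vowels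
  let i2 := pvSkip pvIsVowel w i1                 -- skip the first vowel run
  let i  := pvSkip (fun c => !pvIsVowel c) w i2   -- skip the gap
  let j  := pvSkip pvIsVowel w i                  -- measure the second vowel run
  (j : Int) - (i : Int)

-- ===== PRECONDITION & SPEC =====
def Spec_count_syllable_len (word : String) (out : Int) : Prop := out = count_syllable_len_alt word
instance (word : String) (out : Int) : Decidable (Spec_count_syllable_len word out) := by unfold Spec_count_syllable_len; infer_instance

-- ===== CLAIM (what is proved, stated in full; the proofs are below) =====
def Claim_equal_count_syllable_len : Prop := ∀ (word : String), Dom_count_syllable_len word → Spec_count_syllable_len word (count_syllable_len word)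

-- ===== LEMMAS AND PROOFS =====

-- lengths of the maximal vowel runs, in order (characterisation of A's list)
def pvVowelRuns : List Char → List Int
  | [] => []
  | c :: cs =>
    if pvIsVowel c then
      ((1 + (cs.takeWhile pvIsVowel).length : Nat) : Int) :: pvVowelRuns (cs.dropWhile pvIsVowel)
    else pvVowelRuns cs
termination_by l => l.length
decreasing_by
  · simpa using Nat.lt_succ_of_le (List.length_dropWhile_le pvIsVowel cs)
  · simp

-- A's loop state with a pending vowel count c, flushed at the end
def pvRunsAux (c : Int) : List Char → List Int
  | [] => if c > 0 then [c] else []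
  | x :: xs =>
    if pvIsVowel x then pvRunsAux (c + 1) xs
    else if c > 0 then c :: pvRunsAux 0 xs else pvRunsAux c xs

theorem pvFold_eq_runsAux (l : List Char) : ∀ (c : Int) (lens : List Int),
    (let st := l.foldl
      (fun (st : Int × List Int) letter =>
        if pvIsVowel letter then (st.1 + 1, st.2)
        else if st.1 > 0 then (0, st.2 ++ [st.1]) else st) (c, lens)
     if st.1 > 0 then st.2 ++ [st.1] else st.2) = lens ++ pvRunsAux c l := by
  induction l with
  | nil => intro c lens; simp [pvRunsAux]; split <;> simp
  | cons x xs ih =>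
    intro c lens
    simp only [List.foldl_cons, pvRunsAux]
    by_cases hv : pvIsVowel x
    · simp [hv, ih]
    · by_cases hc : c > 0
      · simp [hv, hc, ih]
      · simp [hv, hc, ih]

theorem pvRunsAux_pos (l : List Char) : ∀ c : Int, 0 < c →
    pvRunsAux c l = (c + ((l.takeWhile pvIsVowel).length : Int)) :: pvRunsAux 0 (l.dropWhile pvIsVowel) := by
  induction l with
  | nil => intro c hc; simp [pvRunsAux, hc]
  | cons x xs ih =>
    intro c hc
    by_cases hv : pvIsVowel x
    · simp only [pvRunsAux, hv, if_pos, List.takeWhile_cons_of_pos, List.dropWhile_cons_of_pos]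
      rw [ih (c + 1) (by omega)]
      simp; ring
    · simp [pvRunsAux, hv, hc, List.takeWhile_cons_of_neg, List.dropWhile_cons_of_neg]

theorem pvRunsAux_zero (l : List Char) : pvRunsAux 0 l = pvVowelRuns l := by
  induction l using pvVowelRuns.induct with
  | case1 => simp [pvRunsAux, pvVowelRuns]
  | case2 c cs hv ih =>
    rw [pvVowelRuns, if_pos hv, pvRunsAux, if_pos hv,
      show (0:Int)+1 = 1 from rfl, pvRunsAux_pos _ 1 one_pos, ih]
    push_cast; ring_nf
  | case3 c cs hv ih =>
    rw [pvVowelRuns, if_neg hv, pvRunsAux, if_neg hv, if_neg (by norm_num), ih]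

-- pvSkip advances past the maximal p-run starting at i
theorem pvSkip_eq (p : Char → Bool) (w : List Char) : ∀ i : Nat,
    pvSkip p w i = i + ((w.drop i).takeWhile p).length := by
  intro i
  induction i using pvSkip.induct p w with
  | case1 i h ih =>
    obtain ⟨hi, hp⟩ := h
    rw [pvSkip, dif_pos ⟨hi, hp⟩, ih,
      List.drop_eq_getElem_cons hi, List.takeWhile_cons_of_pos (by simpa [List.getD, hi] using hp)]
    simp; omega
  | case2 i h =>
    rw [pvSkip, dif_neg h]
    rcases Nat.lt_or_ge i w.length with hi | hi
    · have hp : p (w.getD i ' ') = false := by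
        by_contra hc; exact h ⟨hi, by simpa using hc⟩
      rw [List.drop_eq_getElem_cons hi,
        List.takeWhile_cons_of_neg (by simpa [List.getD, hi] using hp)]
      simp
    · simp [List.drop_eq_nil_of_le hi]

theorem pvDropWhile_eq_drop (p : Char → Bool) (l : List Char) :
    l.dropWhile p = l.drop (l.takeWhile p).length := by
  induction l with
  | nil => simp
  | cons a as ih =>
    by_cases h : p a
    · simp [List.dropWhile_cons_of_pos h, List.takeWhile_cons_of_pos h, ih]
    · simp [List.dropWhile_cons_of_neg (by simpa using h),
        List.takeWhile_cons_of_neg (by simpa using h)]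

theorem pvDropAdd (l : List Char) (m n : Nat) : l.drop (m + n) = (l.drop m).drop n := by
  rw [List.drop_drop, Nat.add_comm]

theorem pvDropWhile_head_false (p : Char → Bool) (l : List Char) (x : Char) (xs : List Char)
    (h : l.dropWhile p = x :: xs) : p x = false := by
  induction l with
  | nil => simp at h
  | cons a as ih =>
    by_cases ha : p a
    · exact ih (by rwa [List.dropWhile_cons_of_pos ha] at h)
    · rw [List.dropWhile_cons_of_neg (by simpa using ha)] at h
      cases h; simpa using ha

-- second element (or 0) of the run list = length of the second run, as B computes it
theorem pvSecondRun (l : List Char) :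
    (match pvVowelRuns l with
      | _ :: x :: _ => x
      | _ => (0 : Int)) =
    (((((l.dropWhile (fun c => !pvIsVowel c)).dropWhile pvIsVowel).dropWhile
        (fun c => !pvIsVowel c)).takeWhile pvIsVowel).length : Int) := by
  have hruns_drop : ∀ m : List Char, pvVowelRuns (m.dropWhile (fun c => !pvIsVowel c)) = pvVowelRuns m := by
    intro m
    induction m with
    | nil => simp
    | cons a as ih =>
      by_cases ha : pvIsVowel a
      · rw [List.dropWhile_cons_of_neg (by simpa using ha)]
      · rw [List.dropWhile_cons_of_pos (by simpa using ha), ih, pvVowelRuns, if_neg ha]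
  set l1 := l.dropWhile (fun c => !pvIsVowel c) with hl1
  cases h1 : l1 with
  | nil => simp [← hruns_drop l, ← hl1, h1, pvVowelRuns]
  | cons c cs =>
    have hc : pvIsVowel c = true := by
      have := pvDropWhile_head_false _ l c cs (hl1 ▸ h1)
      simpa using this
    have hrun1 : pvVowelRuns l1 =
        ((1 + (cs.takeWhile pvIsVowel).length : Nat) : Int) :: pvVowelRuns (cs.dropWhile pvIsVowel) := by
      rw [h1, pvVowelRuns, if_pos hc]
    rw [← hruns_drop l, ← hl1, hrun1, List.dropWhile_cons_of_pos hc]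
    set l3 := (cs.dropWhile pvIsVowel).dropWhile (fun c => !pvIsVowel c) with hl3
    rw [← hruns_drop (cs.dropWhile pvIsVowel), ← hl3]
    cases h3 : l3 with
    | nil => simp [pvVowelRuns]
    | cons d ds =>
      have hd : pvIsVowel d = true := by
        have := pvDropWhile_head_false _ (cs.dropWhile pvIsVowel) d ds (hl3 ▸ h3)
        simpa using this
      rw [pvVowelRuns, if_pos hd]
      simp [List.takeWhile_cons_of_pos hd]
      ring

theorem pvIfGetD (rs : List Int) :
    (if rs.length ≥ 2 then rs.getD 1 0 else 0) =
    (match rs with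
      | _ :: x :: _ => x
      | _ => (0 : Int)) := by
  match rs with
  | [] => simp
  | [a] => simp
  | a :: b :: t => simp [List.getD]

-- ===== VERDICT (by name: the statement is the Claim_ definition above) =====
theorem count_syllable_len_spec : Claim_equal_count_syllable_len := by
  intro word _
  unfold Spec_count_syllable_len count_syllable_len count_syllable_len_alt
  set l := (PySem.Str.stripChars (PySem.Str.lower word) ".:;?!").toList with hl
  -- A's value = second element (or 0) of pvVowelRuns l
  have hA := pvFold_eq_runsAux l 0 []
  simp only [List.nil_append, pvRunsAux_zero] at hA
  simp only []
  rw [show (fun (st : Int × List Int) letter =>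
        if ("aeiou".toList).contains letter then (st.1 + 1, st.2)
        else if st.1 > 0 then (0, st.2 ++ [st.1]) else st)
      = (fun (st : Int × List Int) letter =>
        if pvIsVowel letter then (st.1 + 1, st.2)
        else if st.1 > 0 then (0, st.2 ++ [st.1]) else st) from rfl]
  rw [hA]
  -- B's value: unwind the four skips into dropWhile/takeWhile form
  have hs1 := pvSkip_eq (fun c => !pvIsVowel c) l 0
  simp only [List.drop_zero, Nat.zero_add] at hs1
  have hd1 : l.drop (pvSkip (fun c => !pvIsVowel c) l 0) = l.dropWhile (fun c => !pvIsVowel c) := by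
    rw [hs1, ← pvDropWhile_eq_drop]
  have hs2 := pvSkip_eq pvIsVowel l (pvSkip (fun c => !pvIsVowel c) l 0)
  rw [hd1] at hs2
  have hd2 : l.drop (pvSkip pvIsVowel l (pvSkip (fun c => !pvIsVowel c) l 0))
      = (l.dropWhile (fun c => !pvIsVowel c)).dropWhile pvIsVowel := by
    rw [hs2, pvDropAdd, hd1, ← pvDropWhile_eq_drop]
  have hs3 := pvSkip_eq (fun c => !pvIsVowel c) l (pvSkip pvIsVowel l (pvSkip (fun c => !pvIsVowel c) l 0))
  rw [hd2] at hs3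
  have hd3 : l.drop (pvSkip (fun c => !pvIsVowel c) l (pvSkip pvIsVowel l (pvSkip (fun c => !pvIsVowel c) l 0)))
      = ((l.dropWhile (fun c => !pvIsVowel c)).dropWhile pvIsVowel).dropWhile (fun c => !pvIsVowel c) := by
    rw [hs3, pvDropAdd, hd2, ← pvDropWhile_eq_drop]
  have hs4 := pvSkip_eq pvIsVowel l (pvSkip (fun c => !pvIsVowel c) l (pvSkip pvIsVowel l (pvSkip (fun c => !pvIsVowel c) l 0)))
  rw [hd3] at hs4
  rw [pvIfGetD, pvSecondRun l, hs4]
  push_cast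
  ring
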